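-- pv_equiv track=rewrite | github.com/icdev-ai/icdev | tools/compliance/ivv_report_generator.py | _build_findings_by_severity
-- ===== SOURCE A (Python) =====
-- SEVERITY_ORDER = ["critical", "high", "moderate", "low"]
--
-- def _build_findings_by_severity(findings):
--     """Build per-severity sections of IV&V findings.
--
--     Returns a dict mapping severity to a markdown string.
--     """
--     grouped = {sev: [] for sev in SEVERITY_ORDER}
--     for f in findings:
--         sev = f.get("severity", "low")
--         if sev in grouped:
--             grouped[sev].append(f)
--
--     result = {}
--     for sev in SEVERITY_ORDER:
--         items = grouped[sev]
--         if not items: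
--             result[sev] = f"*No {sev} findings.*"
--             continue
--
--         lines = [
--             "| Finding ID | Process Area | Title | Status | Recommendation |",
--             "|------------|-------------|-------|--------|----------------|",
--         ]
--         for f in sorted(items, key=lambda x: x.get("finding_id", "")):
--             fid = f.get("finding_id", "N/A")
--             pa = f.get("process_area", "N/A")
--             title = (f.get("title") or "").replace("\n", " ").strip()
--             status = f.get("status", "open")
--             rec = (
--                 (f.get("recommendation") or "").replace("\n", " ").strip()
--             )
--
--             if len(title) > 50:
--                 title = title[:47] + "..."
--             if len(rec) > 60:
--                 rec = rec[:57] + "..."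
--
--             lines.append(
--                 f"| {fid} | {pa} | {title} | {status} | {rec} |"
--             )
--
--         result[sev] = "\n".join(lines)
--
--     return result
-- ===== SOURCE B (Python) =====
-- SEVERITY_ORDER = ["critical", "high", "moderate", "low"]
--
--
-- def _format_row(f):
--     fid = f.get("finding_id", "N/A")
--     pa = f.get("process_area", "N/A")
--     title = (f.get("title") or "").replace("\n", " ").strip()
--     status = f.get("status", "open")
--     rec = (f.get("recommendation") or "").replace("\n", " ").strip()
--     if len(title) > 50:
--         title = title[:47] + "..."
--     if len(rec) > 60:
--         rec = rec[:57] + "..."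
--     return f"| {fid} | {pa} | {title} | {status} | {rec} |"
--
--
-- def _section(sev, items):
--     if not items:
--         return f"*No {sev} findings.*"
--     header = [
--         "| Finding ID | Process Area | Title | Status | Recommendation |",
--         "|------------|-------------|-------|--------|----------------|",
--     ]
--     rows = [_format_row(f) for f in sorted(items, key=lambda x: x.get("finding_id", ""))]
--     return "\n".join(header + rows)
--
--
-- def _build_findings_by_severity(findings):
--     return {
--         sev: _section(sev, [f for f in findings if f.get("severity", "low") == sev])
--         for sev in SEVERITY_ORDER
--     }
-- ===== Notes on version B (the rewrite author's own statement) =====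
-- stated objective: simpler
-- what changed: Replaces the mutable pre-built grouped dict and its populating/guard loop, and the line-accumulator append loop, with a single dict comprehension over SEVERITY_ORDER that filters the findings per severity and formats each section via map/join helpers.
import Mathlib
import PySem

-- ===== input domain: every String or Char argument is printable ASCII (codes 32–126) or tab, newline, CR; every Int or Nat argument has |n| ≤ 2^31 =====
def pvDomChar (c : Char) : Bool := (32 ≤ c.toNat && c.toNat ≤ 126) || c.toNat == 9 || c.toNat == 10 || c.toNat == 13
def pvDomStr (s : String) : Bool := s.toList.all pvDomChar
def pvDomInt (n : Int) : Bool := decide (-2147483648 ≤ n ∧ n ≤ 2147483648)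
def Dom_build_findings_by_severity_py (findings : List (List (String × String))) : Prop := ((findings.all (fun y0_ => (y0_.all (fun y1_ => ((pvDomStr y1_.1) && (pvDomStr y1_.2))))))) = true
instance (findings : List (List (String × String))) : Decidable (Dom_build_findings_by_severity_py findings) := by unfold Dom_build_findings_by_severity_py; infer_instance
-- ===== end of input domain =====

-- B replaces A's mutable grouped dict and its append loops by a per-severity filter
-- and map/join section helpers (objective: simpler decomposition; same asymptotic cost).

-- shared module constant SEVERITY_ORDER
def pvSevOrder : List String := ["critical", "high", "moderate", "low"]

-- ===== PORT A =====
-- the else-branch of A's per-severity loop body (header lines, row-append loop, join)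
def pvSectionA (sev : String) (items : List (List (String × String))) : String :=
  if items = [] then "*No " ++ sev ++ " findings.*"
  else
    let lines : List String :=
      ["| Finding ID | Process Area | Title | Status | Recommendation |",
       "|------------|-------------|-------|--------|----------------|"]
    let lines :=
      (PySem.List.sorted items (fun x => PySem.Dict.getD (PySem.Dict.mk x) "finding_id" "") false).foldl
        (fun lines f =>
          let d := PySem.Dict.mk f
          let fid := PySem.Dict.getD d "finding_id" "N/A"
          let pa := PySem.Dict.getD d "process_area" "N/A"
          let title := PySem.Str.strip (PySem.Str.replace ((PySem.Dict.get? d "title").getD "") "\n" " ")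
          let status := PySem.Dict.getD d "status" "open"
          let rec0 := PySem.Str.strip (PySem.Str.replace ((PySem.Dict.get? d "recommendation").getD "") "\n" " ")
          let title := if PySem.Str.len title > 50 then PySem.Str.slice title none (some 47) ++ "..." else title
          let rec0 := if PySem.Str.len rec0 > 60 then PySem.Str.slice rec0 none (some 57) ++ "..." else rec0
          lines ++ ["| " ++ fid ++ " | " ++ pa ++ " | " ++ title ++ " | " ++ status ++ " | " ++ rec0 ++ " |"])
        lines
    PySem.Str.join "\n" lines

def build_findings_by_severity_py (findings : List (List (String × String))) : List (String × String) :=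
  let grouped : PySem.Dict String (List (List (String × String))) :=
    pvSevOrder.foldl (fun d sev => d.insert sev []) PySem.Dict.empty
  let grouped :=
    findings.foldl (fun d f =>
      let sev := PySem.Dict.getD (PySem.Dict.mk f) "severity" "low"
      if d.contains sev then d.modify sev [] (fun l => l ++ [f]) else d) grouped
  let result :=
    pvSevOrder.foldl (fun r sev => r.insert sev (pvSectionA sev (grouped.getD sev []))) PySem.Dict.empty
  result.items

-- ===== PORT B =====
def pvFormatRow (f : List (String × String)) : String :=
  let d := PySem.Dict.mk f
  let fid := PySem.Dict.getD d "finding_id" "N/A"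
  let pa := PySem.Dict.getD d "process_area" "N/A"
  let title := PySem.Str.strip (PySem.Str.replace ((PySem.Dict.get? d "title").getD "") "\n" " ")
  let status := PySem.Dict.getD d "status" "open"
  let rec0 := PySem.Str.strip (PySem.Str.replace ((PySem.Dict.get? d "recommendation").getD "") "\n" " ")
  let title := if PySem.Str.len title > 50 then PySem.Str.slice title none (some 47) ++ "..." else title
  let rec0 := if PySem.Str.len rec0 > 60 then PySem.Str.slice rec0 none (some 57) ++ "..." else rec0
  "| " ++ fid ++ " | " ++ pa ++ " | " ++ title ++ " | " ++ status ++ " | " ++ rec0 ++ " |"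

def pvSection (sev : String) (items : List (List (String × String))) : String :=
  if items = [] then "*No " ++ sev ++ " findings.*"
  else
    let header : List String :=
      ["| Finding ID | Process Area | Title | Status | Recommendation |",
       "|------------|-------------|-------|--------|----------------|"]
    let rows :=
      (PySem.List.sorted items (fun x => PySem.Dict.getD (PySem.Dict.mk x) "finding_id" "") false).map pvFormatRow
    PySem.Str.join "\n" (header ++ rows)

def build_findings_by_severity_py_alt (findings : List (List (String × String))) : List (String × String) :=
  (pvSevOrder.foldl
    (fun r sev =>
      r.insert sev
        (pvSection sev (findings.filter (fun f => PySem.Dict.getD (PySem.Dict.mk f) "severity" "low" == sev))))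
    PySem.Dict.empty).items

-- ===== PRECONDITION & SPEC =====
def Spec_build_findings_by_severity_py (findings : List (List (String × String))) (out : List (String × String)) : Prop := out = build_findings_by_severity_py_alt findings
instance (findings : List (List (String × String))) (out : List (String × String)) : Decidable (Spec_build_findings_by_severity_py findings out) := by unfold Spec_build_findings_by_severity_py; infer_instance

-- ===== CLAIM (what is proved, stated in full; the proofs are below) =====
def Claim_equal_build_findings_by_severity_py : Prop := ∀ (findings : List (List (String × String))), Dom_build_findings_by_severity_py findings → Spec_build_findings_by_severity_py findings (build_findings_by_severity_py findings)

-- ===== LEMMAS AND PROOFS =====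

-- A's row-append loop is header ++ map of the row formatter
theorem pv_foldl_append_map (l : List (List (String × String))) (init : List String) :
    l.foldl (fun acc f => acc ++ [pvFormatRow f]) init = init ++ l.map pvFormatRow := by
  induction l generalizing init with
  | nil => simp
  | cons f t ih => simp [List.foldl, ih]

theorem pvSection_eq (sev : String) (items : List (List (String × String))) :
    pvSectionA sev items = pvSection sev items := by
  unfold pvSectionA pvSection
  split
  · rfl
  · show PySem.Str.join "\n"
        (List.foldl (fun acc f => acc ++ [pvFormatRow f])
          ["| Finding ID | Process Area | Title | Status | Recommendation |",
           "|------------|-------------|-------|--------|----------------|"]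
          (PySem.List.sorted items (fun x => PySem.Dict.getD (PySem.Dict.mk x) "finding_id" "") false)) = _
    rw [pv_foldl_append_map]

-- A's grouped-dict loop yields, at each key it contains, the filter of the findings
theorem pv_grouped_getD (fs : List (List (String × String)))
    (d : PySem.Dict String (List (List (String × String)))) (sev : String)
    (h : d.contains sev = true) :
    (fs.foldl (fun d f =>
        let s := PySem.Dict.getD (PySem.Dict.mk f) "severity" "low"
        if d.contains s then d.modify s [] (fun l => l ++ [f]) else d) d).getD sev []
      = d.getD sev [] ++ fs.filter (fun f => PySem.Dict.getD (PySem.Dict.mk f) "severity" "low" == sev) := by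
  induction fs generalizing d with
  | nil => simp
  | cons f t ih =>
    simp only [List.foldl, List.filter]
    by_cases hc : d.contains (PySem.Dict.getD (PySem.Dict.mk f) "severity" "low") = true
    · simp only [hc, if_true]
      have hc' : (d.modify (PySem.Dict.getD (PySem.Dict.mk f) "severity" "low") [] (fun l => l ++ [f])).contains sev = true := by
        rw [PySem.Dict.contains_modify]
        simp [h]
      rw [ih _ hc', PySem.Dict.getD_modify]
      by_cases hk : sev = PySem.Dict.getD (PySem.Dict.mk f) "severity" "low"
      · simp [hk, List.append_assoc]
      · have : (PySem.Dict.getD (PySem.Dict.mk f) "severity" "low" == sev) = false := by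
          simp [Ne.symm hk]
        simp [hk, this]
    · have hne : (PySem.Dict.getD (PySem.Dict.mk f) "severity" "low" == sev) = false := by
        by_contra hx
        have : PySem.Dict.getD (PySem.Dict.mk f) "severity" "low" = sev := by
          simpa using hx
        rw [this] at hc
        exact hc h
      simp only [hc, hne]
      exact ih _ h

-- ===== VERDICT (by name: the statement is the Claim_ definition above) =====
theorem build_findings_by_severity_py_spec : Claim_equal_build_findings_by_severity_py := by
  intro findings _
  show build_findings_by_severity_py findings = build_findings_by_severity_py_alt findings
  unfold build_findings_by_severity_py build_findings_by_severity_py_alt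
  have g0 : pvSevOrder.foldl (fun d sev => d.insert sev ([] : List (List (String × String)))) PySem.Dict.empty
      = PySem.Dict.mk [("critical", []), ("high", []), ("moderate", []), ("low", [])] := by rfl
  simp only [g0]
  simp only [pvSevOrder, List.foldl]
  rw [pv_grouped_getD _ _ "critical" (by rfl), pv_grouped_getD _ _ "high" (by rfl),
      pv_grouped_getD _ _ "moderate" (by rfl), pv_grouped_getD _ _ "low" (by rfl)]
  simp [pvSection_eq, PySem.Dict.getD, PySem.Dict.get?]
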